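-- pv_equiv track=rewrite | github.com/ValRCS/DAS_Python_24 | A29_Group/Topic_9_Tuples_Sets/tuples.py | all_indexes_v2
-- ===== SOURCE A (Python) =====
-- def all_indexes_v2(my_tuple, needle):
--     indexes = []
--     i = 0 # we start looking at index 0
--     try:
--         while True:
--             i = my_tuple.index(needle, i)
--             indexes.append(i)
--             i += 1 # I will use next position to find next index
--     except ValueError:
--         return tuple(indexes)
-- ===== SOURCE B (Python) =====
-- def all_indexes_v2(my_tuple, needle):
--     # one explicit enumerate pass instead of repeated .index calls with try/except
--     return tuple(i for i, x in enumerate(my_tuple) if x is needle or x == needle)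
-- ===== Notes on version B (the rewrite author's own statement) =====
-- stated objective: idiomatic
-- what changed: Replaced the repeated my_tuple.index(needle, i) calls inside a try/except-ValueError while-loop by a single enumerate generator that yields each index whose element matches (identity-or-equality, mirroring .index).
import Mathlib
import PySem

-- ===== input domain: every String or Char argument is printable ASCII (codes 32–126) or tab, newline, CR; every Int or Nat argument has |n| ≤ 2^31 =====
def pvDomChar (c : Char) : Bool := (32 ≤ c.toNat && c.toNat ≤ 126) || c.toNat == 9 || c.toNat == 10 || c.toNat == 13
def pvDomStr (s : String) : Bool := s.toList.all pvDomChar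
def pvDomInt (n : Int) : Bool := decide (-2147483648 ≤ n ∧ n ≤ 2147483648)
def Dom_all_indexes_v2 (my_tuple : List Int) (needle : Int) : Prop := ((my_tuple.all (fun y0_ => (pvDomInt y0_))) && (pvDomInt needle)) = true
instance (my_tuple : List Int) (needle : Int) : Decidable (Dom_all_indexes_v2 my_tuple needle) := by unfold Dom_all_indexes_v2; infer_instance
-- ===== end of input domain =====

-- B replaces A's repeated .index + try/except-ValueError loop by a single enumerate pass (idiomatic).
-- ===== PORT A =====
-- my_tuple.index(needle, i): first index >= i holding needle; none = ValueError
def pyIndexFrom (xs : List Int) (v : Int) (i : Nat) : Option Nat :=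
  (PySem.List.index? (xs.drop i) v).map (fun k => k + i)

theorem pyIndexFrom_bounds {xs : List Int} {v : Int} {i j : Nat}
    (h : pyIndexFrom xs v i = some j) : i ≤ j ∧ j < xs.length := by
  unfold pyIndexFrom at h
  simp only [Option.map_eq_some_iff] at h
  obtain ⟨k, hk, hkj⟩ := h
  obtain ⟨hlt, -, -⟩ := PySem.List.getElem_of_index?_eq_some hk
  rw [List.length_drop] at hlt
  omega

-- the while-True loop of A: state is the current search position i (indexes are emitted in order)
def allLoopA (xs : List Int) (v : Int) (i : Nat) : List Int :=
  match h : pyIndexFrom xs v i with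
  | none => []
  | some j => (j : Int) :: allLoopA xs v (j + 1)
termination_by xs.length - i
decreasing_by
  obtain ⟨h1, h2⟩ := pyIndexFrom_bounds h
  omega

def all_indexes_v2 (my_tuple : List Int) (needle : Int) : List Int :=
  allLoopA my_tuple needle 0

-- ===== PORT B =====
def all_indexes_v2_alt (my_tuple : List Int) (needle : Int) : List Int :=
  (PySem.List.enumerate my_tuple 0).filterMap
    (fun p => if p.2 = needle then some p.1 else none)

-- ===== PRECONDITION & SPEC =====
def Spec_all_indexes_v2 (my_tuple : List Int) (needle : Int) (out : List Int) : Prop := out = all_indexes_v2_alt my_tuple needle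
instance (my_tuple : List Int) (needle : Int) (out : List Int) : Decidable (Spec_all_indexes_v2 my_tuple needle out) := by unfold Spec_all_indexes_v2; infer_instance

-- ===== CLAIM (what is proved, stated in full; the proofs are below) =====
def Claim_equal_all_indexes_v2 : Prop := ∀ (my_tuple : List Int) (needle : Int), Dom_all_indexes_v2 my_tuple needle → Spec_all_indexes_v2 my_tuple needle (all_indexes_v2 my_tuple needle)

-- ===== LEMMAS AND PROOFS =====

theorem allLoopA_none {xs : List Int} {v : Int} {i : Nat}
    (h : pyIndexFrom xs v i = none) : allLoopA xs v i = [] := by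
  rw [allLoopA]; split
  · rfl
  · rename_i j hj; rw [h] at hj; cases hj

theorem allLoopA_some {xs : List Int} {v : Int} {i j : Nat}
    (h : pyIndexFrom xs v i = some j) :
    allLoopA xs v i = (j : Int) :: allLoopA xs v (j + 1) := by
  rw [allLoopA]; split
  · rename_i hn; rw [h] at hn; cases hn
  · rename_i j' hj; rw [h] at hj; cases hj; rfl

theorem allLoopA_eq (xs : List Int) (v : Int) :
    ∀ n i, xs.length - i ≤ n →
      allLoopA xs v i =
        (PySem.List.enumerate (xs.drop i) (i : Int)).filterMap
          (fun p => if p.2 = v then some p.1 else none) := by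
  intro n
  induction n with
  | zero =>
    intro i hi
    have hdrop : xs.drop i = [] := List.drop_eq_nil_of_le (by omega)
    rw [allLoopA_none (by unfold pyIndexFrom; rw [hdrop]; rfl), hdrop,
      PySem.List.enumerate_nil]
    rfl
  | succ n ih =>
    intro i hi
    cases hdrop : xs.drop i with
    | nil =>
      rw [allLoopA_none (by unfold pyIndexFrom; rw [hdrop]; rfl),
        PySem.List.enumerate_nil]
      rfl
    | cons x rest =>
      have hilen : i < xs.length := by
        by_contra hle
        rw [List.drop_eq_nil_of_le (by omega : xs.length ≤ i)] at hdrop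
        cases hdrop
      have hrest : xs.drop (i + 1) = rest := by
        rw [← List.drop_drop (j := i) (i := 1), hdrop]; rfl
      by_cases hxv : x = v
      · have hIdx : pyIndexFrom xs v i = some i := by
          unfold pyIndexFrom; rw [hdrop, hxv, PySem.List.index?_cons_self]; simp
        rw [allLoopA_some hIdx, ih (i + 1) (by omega), hrest,
          PySem.List.enumerate_cons]
        simp [hxv]
      · have hIdx : pyIndexFrom xs v i =
            (PySem.List.index? rest v).map (fun k => k + (i + 1)) := by
          unfold pyIndexFrom
          rw [hdrop, PySem.List.index?_cons_of_ne rest hxv]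
          cases PySem.List.index? rest v with
          | none => rfl
          | some k => simp; omega
        have hIdx' : pyIndexFrom xs v (i + 1) =
            (PySem.List.index? rest v).map (fun k => k + (i + 1)) := by
          unfold pyIndexFrom; rw [hrest]
        have hskip : allLoopA xs v i = allLoopA xs v (i + 1) := by
          cases hk : (PySem.List.index? rest v).map (fun k => k + (i + 1)) with
          | none => rw [allLoopA_none (hIdx.trans hk), allLoopA_none (hIdx'.trans hk)]
          | some j => rw [allLoopA_some (hIdx.trans hk), allLoopA_some (hIdx'.trans hk)]
        rw [hskip, ih (i + 1) (by omega), hrest, PySem.List.enumerate_cons]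
        simp [hxv]

-- ===== VERDICT (by name: the statement is the Claim_ definition above) =====
theorem all_indexes_v2_spec : Claim_equal_all_indexes_v2 := by
  intro my_tuple needle _
  unfold Spec_all_indexes_v2 all_indexes_v2 all_indexes_v2_alt
  have := allLoopA_eq my_tuple needle my_tuple.length 0 (by omega)
  simpa using this
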